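-- pv_equiv track=rewrite | github.com/LewisStaples/advent_of_code_2015 | day05/day05_partB.py | failed_pair_repeated_twice_test
-- ===== SOURCE A (Python) =====
-- def failed_pair_repeated_twice_test(in_string):
--     # Create a list of tuples with two-char substrings and indices
--     # This loop traverses the input string once, so the loop should be O(N)
--     list_of_2char_and_indices = []
--     for i in range(1, len(in_string)):
--         list_of_2char_and_indices.append((in_string[i-1:i+1], i))
--
--     # The sort will probably be O(NlogN)
--     list_of_2char_and_indices.sort()
--
--     # Go through sorted list to look for duplicates with index diff > 1
--     # This logic traverses the input string once, so it should be O(N)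
--     for i in range(1, len(list_of_2char_and_indices)):
--         if list_of_2char_and_indices[i-1][0] == list_of_2char_and_indices[i][0]:
--             if abs(list_of_2char_and_indices[i-1][1] - list_of_2char_and_indices[i][1]) > 1:
--                 # Example that matches the rule, so failed status is False
--                 return False
--             if i < len(list_of_2char_and_indices) - 1:
--                 if list_of_2char_and_indices[i-1][0] == list_of_2char_and_indices[i+1][0]:
--                     # Example that matches the rule, so failed status is False
--                     return False
--     # No examples found that match the rule, therefore it failed, so failed status is True
--     return True
-- ===== SOURCE B (Python) =====
-- def failed_pair_repeated_twice_test(in_string):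
--     first_seen = {}
--     for i, pair in enumerate(zip(in_string, in_string[1:])):
--         prev = first_seen.get(pair)
--         if prev is None:
--             first_seen[pair] = i
--         elif i - prev >= 2:
--             return False
--     return True
-- ===== Notes on version B (the rewrite author's own statement) =====
-- stated objective: faster
-- what changed: Replaces A's build-all-(pair,index)-tuples, sort, and adjacent-duplicate scan with a single left-to-right pass over a dict mapping each two-char pair to its first index, returning False as soon as a pair recurs two or more positions after its first occurrence.
import Mathlib
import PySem

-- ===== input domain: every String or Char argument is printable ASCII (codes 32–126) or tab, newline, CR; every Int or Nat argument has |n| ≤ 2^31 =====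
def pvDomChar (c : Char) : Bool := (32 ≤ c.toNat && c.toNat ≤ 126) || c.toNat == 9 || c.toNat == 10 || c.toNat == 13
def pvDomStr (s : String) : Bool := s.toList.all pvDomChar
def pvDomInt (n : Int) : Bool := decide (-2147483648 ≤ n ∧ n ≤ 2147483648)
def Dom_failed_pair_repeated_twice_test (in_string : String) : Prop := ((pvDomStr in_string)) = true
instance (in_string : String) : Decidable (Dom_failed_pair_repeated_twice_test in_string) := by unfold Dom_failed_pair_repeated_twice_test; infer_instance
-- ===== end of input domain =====

-- B replaces A's build-all-(pair,index)-tuples + sort + adjacent-scan by a single left-to-right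
-- pass with a dict mapping each two-char pair to its first index (objective: faster, O(n) vs O(n log n)).

-- ===== PORT A =====
-- the scan loop 'for i in range(1, len(list)): …' of A, read through the moving window
-- (list[i-1], list[i], list[i+1]); early 'return False' becomes the value false
def pvScanA : List (String × Int) → Bool
  | [] => true
  | [_] => true
  | [a, b] =>
      if a.1 == b.1 then
        if 1 < (a.2 - b.2).natAbs then false
        else pvScanA [b]
      else pvScanA [b]
  | a :: b :: c :: rest =>
      if a.1 == b.1 then
        if 1 < (a.2 - b.2).natAbs then false
        else
          if a.1 == c.1 then false
          else pvScanA (b :: c :: rest)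
      else pvScanA (b :: c :: rest)

def failed_pair_repeated_twice_test (in_string : String) : Bool :=
  let list_of_2char_and_indices :=
    (PySem.List.pyRange 1 (PySem.Str.len in_string)).foldl
      (fun acc i => acc ++ [(PySem.Str.slice in_string (some (i - 1)) (some (i + 1)), i)]) []
  pvScanA (PySem.List.sorted2 list_of_2char_and_indices Prod.fst Prod.snd)

-- ===== PORT B =====
-- the loop 'for i, pair in enumerate(zip(in_string, in_string[1:])): …' of B
def pvLoopB (d : PySem.Dict (Char × Char) Int) : List (Int × (Char × Char)) → Bool
  | [] => true
  | (i, pair) :: rest =>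
      match d.get? pair with
      | none => pvLoopB (d.insert pair i) rest
      | some prev => if 2 ≤ i - prev then false else pvLoopB d rest

def failed_pair_repeated_twice_test_alt (in_string : String) : Bool :=
  pvLoopB PySem.Dict.empty
    (PySem.List.enumerate (in_string.toList.zip (PySem.Str.slice in_string (some 1) none).toList) 0)

-- ===== PRECONDITION & SPEC =====
def Spec_failed_pair_repeated_twice_test (in_string : String) (out : Bool) : Prop := out = failed_pair_repeated_twice_test_alt in_string
instance (in_string : String) (out : Bool) : Decidable (Spec_failed_pair_repeated_twice_test in_string out) := by unfold Spec_failed_pair_repeated_twice_test; infer_instance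

-- ===== CLAIM (what is proved, stated in full; the proofs are below) =====
def Claim_equal_failed_pair_repeated_twice_test : Prop := ∀ (in_string : String), Dom_failed_pair_repeated_twice_test in_string → Spec_failed_pair_repeated_twice_test in_string (failed_pair_repeated_twice_test in_string)

-- ===== LEMMAS AND PROOFS =====

-- proof-only helpers
def pvLexlt (a b : String × Int) : Prop := a.1 < b.1 ∨ (a.1 = b.1 ∧ a.2 < b.2)
def pvBefore (a b : String × Int) : Bool := decide (a.1 < b.1) || (!decide (b.1 < a.1) && decide (a.2 < b.2))
def pvGood (S : List (String × Int)) : Prop := ∀ a ∈ S, ∀ b ∈ S, a.1 = b.1 → (a.2 - b.2).natAbs ≤ 1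
def pvNoRep (P : List (Char × Char)) : Prop := ∀ k m : Nat, k + 2 ≤ m → m < P.length → P[k]? ≠ P[m]?
def pvListA (s : String) : List (String × Int) :=
  (PySem.List.pyRange 1 (PySem.Str.len s)).map
    (fun i => (PySem.Str.slice s (some (i - 1)) (some (i + 1)), i))
def pvP (s : String) : List (Char × Char) := s.toList.zip s.toList.tail

lemma pvBefore_asym (a b : String × Int) (h : pvBefore a b = true) : pvBefore b a = false := by
  simp [pvBefore] at h ⊢
  rcases h with h | ⟨h1, h2⟩
  · exact ⟨le_of_lt h, fun hba => absurd h (not_lt.mpr hba)⟩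
  · exact ⟨h1, fun _ => le_of_lt h2⟩

lemma pvBefore_false_trans (a b c : String × Int) (hab : pvBefore a b = false)
    (hbc : pvBefore b c = false) : pvBefore a c = false := by
  simp [pvBefore] at hab hbc ⊢
  refine ⟨le_trans hbc.1 hab.1, ?_⟩
  intro hac
  exact le_trans (hbc.2 (le_trans hab.1 hac)) (hab.2 (le_trans hac hbc.1))

lemma pv_insertBy_pw {α : Type} (before : α → α → Bool)
    (hasym : ∀ a b, before a b = true → before b a = false)
    (htrans : ∀ a b c, before a b = false → before b c = false → before a c = false)
    (x : α) (ys : List α) (h : ys.Pairwise (fun a b => before b a = false)) :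
    (PySem.List.insertBy before x ys).Pairwise (fun a b => before b a = false) := by
  induction ys with
  | nil => simp [PySem.List.insertBy]
  | cons y ys ih =>
    rw [List.pairwise_cons] at h
    obtain ⟨hy, hys⟩ := h
    by_cases hxy : before x y = true
    · have he : PySem.List.insertBy before x (y :: ys) = x :: y :: ys := by
        simp [PySem.List.insertBy, hxy]
      rw [he, List.pairwise_cons]
      refine ⟨?_, List.pairwise_cons.mpr ⟨hy, hys⟩⟩
      intro z hz
      rcases List.mem_cons.mp hz with rfl | hz'
      · exact hasym _ _ hxy
      · exact htrans z y x (hy z hz') (hasym _ _ hxy)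
    · have hxy' : before x y = false := by simpa using hxy
      have he : PySem.List.insertBy before x (y :: ys) = y :: PySem.List.insertBy before x ys := by
        simp [PySem.List.insertBy, hxy']
      rw [he, List.pairwise_cons]
      refine ⟨?_, ih hys⟩
      intro z hz
      rcases (PySem.List.mem_insertBy before x z ys).mp hz with rfl | hz'
      · exact hxy'
      · exact hy z hz'

lemma pv_foldl_insertBy_pw {α : Type} (before : α → α → Bool)
    (hasym : ∀ a b, before a b = true → before b a = false)
    (htrans : ∀ a b c, before a b = false → before b c = false → before a c = false) :
    ∀ (xs acc : List α), acc.Pairwise (fun a b => before b a = false) →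
    (xs.foldl (fun acc x => PySem.List.insertBy before x acc) acc).Pairwise
      (fun a b => before b a = false) := by
  intro xs
  induction xs with
  | nil => intro acc h; simpa using h
  | cons x xs ih =>
    intro acc h
    rw [List.foldl_cons]
    exact ih _ (pv_insertBy_pw before hasym htrans x acc h)

lemma pv_sorted2_eq (xs : List (String × Int)) :
    PySem.List.sorted2 xs Prod.fst Prod.snd =
      xs.foldl (fun acc x => PySem.List.insertBy pvBefore x acc) [] := rfl

lemma pv_sorted2_pairwise_lexlt (L : List (String × Int))
    (hnd : (L.map (fun x => x.2)).Nodup) :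
    (PySem.List.sorted2 L Prod.fst Prod.snd).Pairwise pvLexlt := by
  have h1 : (PySem.List.sorted2 L Prod.fst Prod.snd).Pairwise (fun a b => pvBefore b a = false) := by
    rw [pv_sorted2_eq]
    exact pv_foldl_insertBy_pw pvBefore pvBefore_asym pvBefore_false_trans L [] (by simp)
  have hperm := PySem.List.sorted2_perm L Prod.fst Prod.snd false
  have h2 : ((PySem.List.sorted2 L Prod.fst Prod.snd).map (fun x => x.2)).Nodup :=
    ((hperm.map (fun x => x.2)).nodup_iff).mpr hnd
  have h3 : (PySem.List.sorted2 L Prod.fst Prod.snd).Pairwise (fun a b => a.2 ≠ b.2) :=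
    List.pairwise_map.mp h2
  refine (h1.and h3).imp ?_
  intro a b ⟨hb, hne⟩
  simp [pvBefore] at hb
  by_cases hlt : a.1.toList < b.1.toList
  · exact Or.inl (String.lt_iff_toList_lt.mpr hlt)
  · have heq : a.1.toList = b.1.toList := le_antisymm hb.1 (not_lt.mp hlt)
    have heq' : a.1 = b.1 := String.toList_inj.mp heq
    have hle : a.2 ≤ b.2 := hb.2 (le_of_eq heq.symm)
    exact Or.inr ⟨heq', by omega⟩

lemma pvGood_nil : pvGood [] := by intro a ha; cases ha

lemma pvGood_cons (a : String × Int) (t : List (String × Int))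
    (h : ∀ z ∈ t, a.1 = z.1 → (a.2 - z.2).natAbs ≤ 1) : pvGood (a :: t) ↔ pvGood t := by
  constructor
  · intro H x hx y hy hxy
    exact H x (List.mem_cons_of_mem _ hx) y (List.mem_cons_of_mem _ hy) hxy
  · intro H x hx y hy hxy
    rcases List.mem_cons.mp hx with rfl | hx' <;> rcases List.mem_cons.mp hy with rfl | hy'
    · simp
    · exact h y hy' hxy
    · have := h x hx' hxy.symm; omega
    · exact H x hx' y hy' hxy

lemma pv_not_good (S : List (String × Int)) (a b : String × Int)
    (ha : a ∈ S) (hb : b ∈ S) (h1 : a.1 = b.1) (h2 : 1 < (a.2 - b.2).natAbs) : ¬ pvGood S :=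
  fun H => by have := H a ha b hb h1; omega

lemma pvLexlt_fst_le (a b : String × Int) (h : pvLexlt a b) : a.1 ≤ b.1 := by
  rcases h with h | ⟨h, _⟩
  · exact le_of_lt h
  · exact le_of_eq h

lemma pvScanA_true_iff (S : List (String × Int)) :
    S.Pairwise pvLexlt → (pvScanA S = true ↔ pvGood S) := by
  induction S using pvScanA.induct with
  | case1 =>
    intro _
    rw [show pvScanA [] = true from by simp [pvScanA]]
    simp only [true_iff]
    exact pvGood_nil
  | case2 x =>
    intro _
    rw [show pvScanA [x] = true from by simp [pvScanA]]
    simp only [true_iff]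
    intro a ha b hb _
    simp at ha hb; subst ha; subst hb; simp
  | case3 a b hab habs =>
    intro _
    rw [show pvScanA [a, b] = false from by simp [pvScanA, hab, habs]]
    simp only [Bool.false_eq_true, false_iff]
    exact pv_not_good _ a b (by simp) (by simp) (by simpa using hab) habs
  | case4 a b hab habs =>
    intro _
    rw [show pvScanA [a, b] = true from by simp [pvScanA, hab, habs]]
    simp only [true_iff]
    intro x hx y hy hxy
    simp at hx hy
    rcases hx with rfl | rfl <;> rcases hy with rfl | rfl
    · simp
    · omega
    · omega
    · simp
  | case5 a b hab =>
    intro _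
    rw [show pvScanA [a, b] = true from by simp [pvScanA, hab]]
    simp only [true_iff]
    have hab' : a.1 ≠ b.1 := by simpa using hab
    intro x hx y hy hxy
    simp at hx hy
    rcases hx with rfl | rfl <;> rcases hy with rfl | rfl
    · simp
    · exact absurd hxy hab'
    · exact absurd hxy.symm hab'
    · simp
  | case6 a b c rest hab habs =>
    intro _
    rw [show pvScanA (a :: b :: c :: rest) = false from by simp [pvScanA, hab, habs]]
    simp only [Bool.false_eq_true, false_iff]
    exact pv_not_good _ a b (by simp) (by simp) (by simpa using hab) habs
  | case7 a b c rest hab habs hac =>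
    intro hp
    rw [show pvScanA (a :: b :: c :: rest) = false from by simp [pvScanA, hab, habs, hac]]
    simp only [Bool.false_eq_true, false_iff]
    have hab' : a.1 = b.1 := by simpa using hab
    have hac' : a.1 = c.1 := by simpa using hac
    rw [List.pairwise_cons] at hp
    obtain ⟨hpa, hp⟩ := hp
    rw [List.pairwise_cons] at hp
    obtain ⟨hpb, _⟩ := hp
    have h1 : a.2 < b.2 := by
      rcases hpa b (by simp) with h | ⟨_, h⟩
      · exact absurd hab' (ne_of_lt h)
      · exact h
    have h2 : b.2 < c.2 := by
      rcases hpb c (by simp) with h | ⟨_, h⟩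
      · exact absurd (hab' ▸ hac') (ne_of_lt h)
      · exact h
    exact pv_not_good _ a c (by simp) (by simp) hac' (by omega)
  | case8 a b c rest hab habs hac ih =>
    intro hp
    rw [show pvScanA (a :: b :: c :: rest) = pvScanA (b :: c :: rest) from by
      simp [pvScanA, hab, habs, hac]]
    have hab' : a.1 = b.1 := by simpa using hab
    have hac' : a.1 ≠ c.1 := by simpa using hac
    rw [List.pairwise_cons] at hp
    obtain ⟨hpa, hp⟩ := hp
    rw [ih hp]
    symm
    apply pvGood_cons
    intro z hz heq
    rcases List.mem_cons.mp hz with rfl | hz'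
    · omega
    · exfalso
      rw [List.pairwise_cons] at hp
      obtain ⟨hpb, hp2⟩ := hp
      have hbc : b.1 < c.1 := by
        rcases hpb c (by simp) with h | ⟨h, _⟩
        · exact h
        · exact absurd (hab' ▸ h) hac'
      have hcz : c.1 ≤ z.1 := by
        rcases List.mem_cons.mp hz' with rfl | hz'' 
        · exact le_refl _
        · rw [List.pairwise_cons] at hp2
          exact pvLexlt_fst_le _ _ (hp2.1 z hz'')
      have hlt : a.1 < z.1 := by
        rw [hab']; exact lt_of_lt_of_le hbc hcz
      exact absurd heq (ne_of_lt hlt)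
  | case9 a b c rest hab ih =>
    intro hp
    rw [show pvScanA (a :: b :: c :: rest) = pvScanA (b :: c :: rest) from by
      simp [pvScanA, hab]]
    have hab' : a.1 ≠ b.1 := by simpa using hab
    rw [List.pairwise_cons] at hp
    obtain ⟨hpa, hp⟩ := hp
    rw [ih hp]
    symm
    apply pvGood_cons
    intro z hz heq
    exfalso
    have hab2 : a.1 < b.1 := by
      rcases hpa b (by simp) with h | ⟨h, _⟩
      · exact h
      · exact absurd h hab'
    have hbz : b.1 ≤ z.1 := by
      rcases List.mem_cons.mp hz with rfl | hz'
      · exact le_refl _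
      · rw [List.pairwise_cons] at hp
        exact pvLexlt_fst_le _ _ (hp.1 z hz')
    exact absurd heq (ne_of_lt (lt_of_lt_of_le hab2 hbz))

lemma pv_A_iff (s : String) :
    failed_pair_repeated_twice_test s = true ↔ pvGood (pvListA s) := by
  have hL : ((PySem.List.pyRange 1 (PySem.Str.len s)).foldl
      (fun acc i => acc ++ [(PySem.Str.slice s (some (i - 1)) (some (i + 1)), i)]) []) = pvListA s := by
    rw [pvListA, PySem.List.foldl_append_singleton_eq_map]
    simp
  show pvScanA (PySem.List.sorted2 _ Prod.fst Prod.snd) = true ↔ _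
  rw [hL]
  have hnd : ((pvListA s).map (fun x => x.2)).Nodup := by
    rw [pvListA, List.map_map]
    have he : ((fun x : String × Int => x.2) ∘
        (fun i : Int => (PySem.Str.slice s (some (i - 1)) (some (i + 1)), i))) = id := rfl
    rw [he, List.map_id]
    exact PySem.List.nodup_pyRange_one _ _
  have hpw := pv_sorted2_pairwise_lexlt (pvListA s) hnd
  rw [pvScanA_true_iff _ hpw]
  have hperm := PySem.List.sorted2_perm (pvListA s) Prod.fst Prod.snd false
  constructor <;> intro H a ha b hb hab
  · exact H a (hperm.mem_iff.mpr ha) b (hperm.mem_iff.mpr hb) hab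
  · exact H a (hperm.mem_iff.mp ha) b (hperm.mem_iff.mp hb) hab

lemma pv_index?_append_ne (R : List (Char × Char)) (p q : Char × Char) (hne : q ≠ p) :
    PySem.List.index? (R ++ [p]) q = PySem.List.index? R q := by
  induction R with
  | nil =>
    rw [List.nil_append, PySem.List.index?_cons_of_ne _ (Ne.symm hne)]
    simp [PySem.List.index?_eq_idxOf?]
  | cons r R ih =>
    by_cases hr : r = q
    · subst hr
      rw [List.cons_append, PySem.List.index?_cons_self, PySem.List.index?_cons_self]
    · rw [List.cons_append, PySem.List.index?_cons_of_ne _ hr, PySem.List.index?_cons_of_ne _ hr, ih]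

lemma pvLoopB_spec : ∀ (Q R : List (Char × Char)) (d : PySem.Dict (Char × Char) Int),
    (∀ p, d.get? p = (PySem.List.index? R p).map (fun k => (k : Int))) →
    (∀ k m : Nat, k + 2 ≤ m → m < R.length → R[k]? ≠ R[m]?) →
    (pvLoopB d (PySem.List.enumerate Q (R.length : Int)) = true ↔ pvNoRep (R ++ Q)) := by
  intro Q
  induction Q with
  | nil =>
    intro R d _ hclean
    simp only [PySem.List.enumerate_nil, pvLoopB, List.append_nil, true_iff]
    exact hclean
  | cons p Q' ih =>
    intro R d hd hclean
    rw [PySem.List.enumerate_cons]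
    cases h : PySem.List.index? R p with
    | none =>
      have hget : d.get? p = none := by rw [hd p, h]; rfl
      have hnm : p ∉ R := (PySem.List.index?_eq_none_iff _ _).mp h
      rw [show pvLoopB d (((R.length : Int), p) :: PySem.List.enumerate Q' ((R.length : Int) + 1)) =
          pvLoopB (d.insert p (R.length : Int)) (PySem.List.enumerate Q' ((R.length : Int) + 1))
        from by simp [pvLoopB, hget]]
      have hlen : ((R.length : Int) + 1) = (((R ++ [p]).length : Nat) : Int) := by
        simp
      rw [List.append_cons R p Q', hlen]
      apply ih
      · intro q
        by_cases hq : q = p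
        · subst hq
          rw [PySem.Dict.get?_insert_self, PySem.List.index?_append_singleton_self R q hnm]
          rfl
        · rw [PySem.Dict.get?_insert_of_ne _ _ hq, hd q, pv_index?_append_ne R p q hq]
      · intro k m h1 h2
        rw [List.length_append, List.length_singleton] at h2
        have hk : k < R.length := by omega
        rw [List.getElem?_append_left hk]
        by_cases hm : m < R.length
        · rw [List.getElem?_append_left hm]; exact hclean k m h1 hm
        · have hm' : m = R.length := by omega
          subst hm'
          rw [List.getElem?_concat_length]
          intro hc
          exact hnm (List.mem_of_getElem? hc)
    | some j =>
      obtain ⟨hjlt, hRj, hmin⟩ := PySem.List.getElem_of_index?_eq_some h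
      have hget : d.get? p = some ((j : Nat) : Int) := by rw [hd p, h]; rfl
      by_cases hfar : 2 ≤ (R.length : Int) - (j : Int)
      · rw [show pvLoopB d (((R.length : Int), p) :: PySem.List.enumerate Q' ((R.length : Int) + 1)) = false
          from by simp [pvLoopB, hget, hfar]]
        simp only [Bool.false_eq_true, false_iff]
        intro hNR
        have hj2 : j + 2 ≤ R.length := by omega
        have hlt : R.length < (R ++ p :: Q').length := by simp
        have e1 : (R ++ p :: Q')[j]? = some p := by
          rw [List.getElem?_append_left hjlt, List.getElem?_eq_getElem hjlt, hRj]
        have e2 : (R ++ p :: Q')[R.length]? = some p := by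
          rw [List.getElem?_append_right (le_refl _)]; simp
        exact hNR j R.length hj2 hlt (e1.trans e2.symm)
      · have hlen1 : R.length = j + 1 := by omega
        rw [show pvLoopB d (((R.length : Int), p) :: PySem.List.enumerate Q' ((R.length : Int) + 1)) =
            pvLoopB d (PySem.List.enumerate Q' ((R.length : Int) + 1))
          from by simp [pvLoopB, hget, hfar]]
        have hmem : p ∈ R := by rw [← hRj]; exact List.getElem_mem _
        have hlen : ((R.length : Int) + 1) = (((R ++ [p]).length : Nat) : Int) := by simp
        rw [List.append_cons R p Q', hlen]
        apply ih
        · intro q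
          by_cases hq : q = p
          · subst hq
            rw [PySem.List.index?_append_of_mem _ hmem, hd q]
          · rw [hd q, pv_index?_append_ne R p q hq]
        · intro k m h1 h2
          rw [List.length_append, List.length_singleton] at h2
          have hk : k < R.length := by omega
          rw [List.getElem?_append_left hk]
          by_cases hm : m < R.length
          · rw [List.getElem?_append_left hm]; exact hclean k m h1 hm
          · have hm' : m = R.length := by omega
            subst hm'
            rw [List.getElem?_concat_length, List.getElem?_eq_getElem hk]
            intro hc
            have hcc : R[k] = p := by simpa using hc
            exact hmin k (by omega) hcc

lemma pv_B_iff (s : String) :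
    failed_pair_repeated_twice_test_alt s = true ↔ pvNoRep (pvP s) := by
  have htl : (PySem.Str.slice s (some 1) none).toList = s.toList.tail := by
    rw [PySem.Str.toList_slice]
    show PySem.List.slice s.toList (some 1) none = _
    rw [PySem.List.slice_from s.toList (by norm_num : (0:Int) ≤ 1)]
    norm_num [List.drop_one]
  unfold failed_pair_repeated_twice_test_alt
  rw [htl]
  have hspec := pvLoopB_spec (s.toList.zip s.toList.tail) [] PySem.Dict.empty
    (by intro p; simp [PySem.Dict.get?_empty, PySem.List.index?_eq_idxOf?])
    (by intro k m _ hm; simp at hm)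
  simpa [pvP] using hspec

lemma pv_pair_entry (l : List Char) (k : Nat) (hk : k + 1 < l.length) :
    (l.zip l.tail)[k]? = some (l[k], l[k + 1]) := by
  have hlen : (l.zip l.tail).length = l.length - 1 := by
    simp [List.length_zip, List.length_tail]
  have hk' : k < (l.zip l.tail).length := by omega
  rw [List.getElem?_eq_getElem hk']
  congr 1
  rw [List.getElem_zip]
  congr 1
  exact List.getElem_tail _

lemma pv_slice_drop (s : String) (i : Int) (h1 : 1 ≤ i) :
    (PySem.Str.slice s (some (i - 1)) (some (i + 1))).toList =
      (s.toList.drop (i - 1).toNat).take 2 := by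
  rw [PySem.Str.toList_slice]
  show PySem.List.slice s.toList (some (i - 1)) (some (i + 1)) = _
  rw [PySem.List.slice_toNat s.toList (by omega) (by omega)]
  congr 1
  omega

lemma pv_drop_take (l : List Char) (k : Nat) (hk : k + 1 < l.length) :
    (l.drop k).take 2 = [l[k], l[k + 1]] := by
  have h1 : k < l.length := by omega
  rw [List.drop_eq_getElem_cons h1, List.drop_eq_getElem_cons hk]
  rfl

lemma pv_good_iff_norep (s : String) : pvGood (pvListA s) ↔ pvNoRep (pvP s) := by
  have hn : PySem.Str.len s = (s.toList.length : Int) := PySem.Str.len_eq s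
  have hPlen : (pvP s).length = s.toList.length - 1 := by
    simp [pvP, List.length_zip, List.length_tail]
  constructor
  · intro H k m hkm hm hPeq
    rw [hPlen] at hm
    have hk1 : k + 1 < s.toList.length := by omega
    have hm1 : m + 1 < s.toList.length := by omega
    have hiMem : ((PySem.Str.slice s (some (((k : Int) + 1) - 1)) (some (((k : Int) + 1) + 1)),
        (k : Int) + 1)) ∈ pvListA s := by
      rw [pvListA]
      exact List.mem_map.mpr ⟨(k : Int) + 1,
        PySem.List.mem_pyRange_one.mpr (by rw [hn]; exact ⟨by omega, by omega⟩), rfl⟩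
    have hjMem : ((PySem.Str.slice s (some (((m : Int) + 1) - 1)) (some (((m : Int) + 1) + 1)),
        (m : Int) + 1)) ∈ pvListA s := by
      rw [pvListA]
      exact List.mem_map.mpr ⟨(m : Int) + 1,
        PySem.List.mem_pyRange_one.mpr (by rw [hn]; exact ⟨by omega, by omega⟩), rfl⟩
    have hPeq' : (s.toList[k], s.toList[k + 1]) = (s.toList[m], s.toList[m + 1]) := by
      have := hPeq
      rw [pvP] at this
      rw [pv_pair_entry s.toList k hk1, pv_pair_entry s.toList m hm1] at this
      exact Option.some_injective _ this
    have hfst : PySem.Str.slice s (some (((k : Int) + 1) - 1)) (some (((k : Int) + 1) + 1)) =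
        PySem.Str.slice s (some (((m : Int) + 1) - 1)) (some (((m : Int) + 1) + 1)) := by
      apply String.toList_inj.mp
      rw [pv_slice_drop s _ (by omega), pv_slice_drop s _ (by omega)]
      have ek : (((k : Int) + 1) - 1).toNat = k := by omega
      have em : (((m : Int) + 1) - 1).toNat = m := by omega
      rw [ek, em, pv_drop_take s.toList k hk1, pv_drop_take s.toList m hm1]
      simp only [Prod.mk.injEq] at hPeq'
      rw [hPeq'.1, hPeq'.2]
    have hle := H _ hiMem _ hjMem hfst
    simp only at hle
    omega
  · intro H a ha b hb hab
    rw [pvListA, List.mem_map] at ha hb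
    obtain ⟨i, hi, rfl⟩ := ha
    obtain ⟨j, hj, rfl⟩ := hb
    rw [PySem.List.mem_pyRange_one, hn] at hi hj
    simp only at hab ⊢
    by_contra hcon
    have h2 : 2 ≤ (i - j).natAbs := by omega
    have hk1 : (i - 1).toNat + 1 < s.toList.length := by omega
    have hm1 : (j - 1).toNat + 1 < s.toList.length := by omega
    have hPeq : (pvP s)[(i - 1).toNat]? = (pvP s)[(j - 1).toNat]? := by
      rw [pvP, pv_pair_entry s.toList _ hk1, pv_pair_entry s.toList _ hm1]
      have hteq := congrArg String.toList hab
      rw [pv_slice_drop s i (by omega), pv_slice_drop s j (by omega)] at hteq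
      rw [pv_drop_take s.toList _ hk1, pv_drop_take s.toList _ hm1] at hteq
      simp only [List.cons.injEq, and_true] at hteq
      rw [hteq.1, hteq.2]
    have hsplit : (i - 1).toNat + 2 ≤ (j - 1).toNat ∨ (j - 1).toNat + 2 ≤ (i - 1).toNat := by omega
    rcases hsplit with hc | hc
    · exact H _ _ hc (by rw [hPlen]; omega) hPeq
    · exact H _ _ hc (by rw [hPlen]; omega) hPeq.symm

-- ===== VERDICT (by name: the statement is the Claim_ definition above) =====
theorem failed_pair_repeated_twice_test_spec : Claim_equal_failed_pair_repeated_twice_test := by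
  intro s _
  unfold Spec_failed_pair_repeated_twice_test
  rw [Bool.eq_iff_iff, pv_A_iff, pv_B_iff, pv_good_iff_norep]
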